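-- pv_equiv track=rewrite | github.com/Assassin114/WordFormat-Covert | docformatter/core/cross_reference.py | _parse_bookmark_name
-- ===== SOURCE A (Python) =====
-- from typing import Dict, List, Tuple, Optional
--
-- def _parse_bookmark_name(name: str) -> Tuple[Optional[str], int]:
--     """从书签名中解析类型和编号"""
--     for prefix, type_name in [('fig_', 'fig'), ('figure_', 'fig'),
--                                 ('tbl_', 'tbl'), ('table_', 'tbl'),
--                                 ('eq_', 'eq'), ('equation_', 'eq')]:
--         if name.startswith(prefix):
--             try:
--                 num = int(name[len(prefix):])
--                 return type_name, num
--             except ValueError: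
--                 pass
--     return None, 0
-- ===== SOURCE B (Python) =====
-- _TYPES = {'fig': 'fig', 'figure': 'fig', 'tbl': 'tbl', 'table': 'tbl',
--           'eq': 'eq', 'equation': 'eq'}
--
-- def _parse_bookmark_name(name):
--     head, sep, rest = name.partition('_')
--     type_name = _TYPES.get(head)
--     if sep and type_name is not None:
--         try:
--             return type_name, int(rest)
--         except ValueError:
--             pass
--     return None, 0
-- ===== Notes on version B (the rewrite author's own statement) =====
-- stated objective: idiomatic
-- what changed: Replaced A's loop over six (prefix, type) pairs with name.startswith and slicing by a single name.partition('_') followed by one dict lookup of the head word and one int() of the rest.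
import Mathlib
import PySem

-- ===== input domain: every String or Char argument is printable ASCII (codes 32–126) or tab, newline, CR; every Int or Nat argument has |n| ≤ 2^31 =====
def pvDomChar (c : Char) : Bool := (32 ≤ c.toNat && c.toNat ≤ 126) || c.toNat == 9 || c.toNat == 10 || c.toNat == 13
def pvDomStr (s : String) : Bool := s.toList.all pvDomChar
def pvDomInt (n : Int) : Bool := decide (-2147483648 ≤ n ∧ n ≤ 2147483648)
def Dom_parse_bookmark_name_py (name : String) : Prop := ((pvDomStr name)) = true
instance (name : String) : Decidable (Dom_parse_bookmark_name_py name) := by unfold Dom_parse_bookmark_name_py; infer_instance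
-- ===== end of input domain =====

-- B replaces A's six-prefix scanning loop by one partition at the first '_' plus a dict lookup (idiomatic rewrite; return value proved equal on all inputs).


-- ===== PORT A =====
-- A's literal prefix table ('fig_' etc. written as character lists)
def pbPrefixes : List (List Char × String) :=
  [(['f','i','g','_'], "fig"), (['f','i','g','u','r','e','_'], "fig"),
   (['t','b','l','_'], "tbl"), (['t','a','b','l','e','_'], "tbl"),
   (['e','q','_'], "eq"), (['e','q','u','a','t','i','o','n','_'], "eq")]

-- A's for-loop: name.startswith(prefix), then int(name[len(prefix):]); ValueError (ofChars? = none) falls through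
def pbLoop (cs : List Char) : List (List Char × String) → Option String × Int
  | [] => (none, 0)
  | (p, tn) :: rest =>
    if PySem.Chars.startswith cs p then
      match PySem.Int.ofChars? (PySem.List.slice cs (some (p.length : Int)) none) with
      | some n => (some tn, n)
      | none => pbLoop cs rest
    else pbLoop cs rest

def parse_bookmark_name_py (name : String) : Option String × Int :=
  pbLoop name.toList pbPrefixes

-- ===== PORT B =====
-- B's module-level dict _TYPES
def pbTypes : PySem.Dict (List Char) String :=
  PySem.Dict.ofList
    [(['f','i','g'], "fig"), (['f','i','g','u','r','e'], "fig"),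
     (['t','b','l'], "tbl"), (['t','a','b','l','e'], "tbl"),
     (['e','q'], "eq"), (['e','q','u','a','t','i','o','n'], "eq")]

-- name.partition('_') ported as takeWhile/dropWhile at the first '_' (exact for a one-character separator:
-- head = part before the first '_'; sep is nonempty iff dropWhile is nonempty; rest = its tail)
def parse_bookmark_name_py_alt (name : String) : Option String × Int :=
  let cs := name.toList
  let head := cs.takeWhile (· != '_')
  match cs.dropWhile (· != '_'), pbTypes.get? head with
  | _ :: rest, some tn =>
    (match PySem.Int.ofChars? rest with
     | some n => (some tn, n)
     | none => (none, 0))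
  | _, _ => (none, 0)

-- ===== PRECONDITION & SPEC =====
def Spec_parse_bookmark_name_py (name : String) (out : Option String × Int) : Prop := out = parse_bookmark_name_py_alt name
instance (name : String) (out : Option String × Int) : Decidable (Spec_parse_bookmark_name_py name out) := by unfold Spec_parse_bookmark_name_py; infer_instance

-- ===== CLAIM (what is proved, stated in full; the proofs are below) =====
def Claim_equal_parse_bookmark_name_py : Prop := ∀ (name : String), Dom_parse_bookmark_name_py name → Spec_parse_bookmark_name_py name (parse_bookmark_name_py name)

-- ===== LEMMAS AND PROOFS =====

-- a '_'-free word followed by '_' is a prefix iff takeWhile stops exactly at that word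
theorem pb_tw (w r : List Char) (hw : '_' ∉ w) : (w ++ '_'::r).takeWhile (· != '_') = w := by
  induction w with
  | nil => simp
  | cons a t ih =>
    simp at hw
    have ha : (a != '_') = true := by simp; exact fun h => hw.1 h.symm
    simp [ha, ih hw.2]

theorem pb_dw (w r : List Char) (hw : '_' ∉ w) : (w ++ '_'::r).dropWhile (· != '_') = '_'::r := by
  induction w with
  | nil => simp
  | cons a t ih =>
    simp at hw
    have ha : (a != '_') = true := by simp; exact fun h => hw.1 h.symm
    simp [ha, ih hw.2]

-- the first character a dropWhile (· != '_') keeps is '_'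
theorem pb_hdw (cs : List Char) (c : Char) (r : List Char)
    (hd : cs.dropWhile (· != '_') = c :: r) : c = '_' := by
  have := List.head_dropWhile_not (p := (· != '_')) (l := cs) (by simp [hd])
  simp only [hd, List.head_cons] at this
  simpa using this

-- A's startswith test, characterised by B's partition: w ++ "_" is a prefix of cs
-- iff cs partitions at the first '_' into head w and a nonempty remainder
theorem pb_sw (w cs : List Char) (hw : '_' ∉ w) :
    PySem.Chars.startswith cs (w ++ ['_']) = true ↔
      (cs.takeWhile (· != '_') = w ∧ cs.dropWhile (· != '_') ≠ []) := by
  rw [PySem.Chars.startswith_iff]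
  constructor
  · rintro ⟨r, hr⟩
    have hr' : cs = w ++ '_'::r := by simpa using hr.symm
    subst hr'
    simp [pb_tw w r hw, pb_dw w r hw]
  · rintro ⟨ht, hd⟩
    rcases he : cs.dropWhile (· != '_') with _ | ⟨c, r⟩
    · exact absurd he hd
    · have hc := pb_hdw cs c r he
      subst hc
      refine ⟨r, ?_⟩
      conv_rhs => rw [← List.takeWhile_append_dropWhile (p := (· != '_')) (l := cs)]
      rw [ht, he]; simp

-- A's slice name[len(prefix):] is exactly B's rest (the tail after the first '_')
theorem pb_rest (w cs r : List Char)
    (ht : cs.takeWhile (· != '_') = w) (hd : cs.dropWhile (· != '_') = '_' :: r) :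
    cs.drop (w.length + 1) = r := by
  conv_lhs => rw [← List.takeWhile_append_dropWhile (p := (· != '_')) (l := cs)]
  rw [ht, hd]
  rw [show w.length + 1 = (w ++ ['_']).length by simp]
  rw [show w ++ '_' :: r = (w ++ ['_']) ++ r by simp]
  exact List.drop_left

theorem pb_main (name : String) : parse_bookmark_name_py name = parse_bookmark_name_py_alt name := by
  unfold parse_bookmark_name_py parse_bookmark_name_py_alt
  set cs := name.toList with hcs
  rcases hdrop : cs.dropWhile (· != '_') with _ | ⟨c, r⟩
  · -- no '_' in the name: every startswith of A fails, B sees an empty remainder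
    have hf : ∀ w : List Char, '_' ∉ w → PySem.Chars.startswith cs (w ++ ['_']) = false := by
      intro w hw
      rw [← Bool.not_eq_true, pb_sw w cs hw]
      simp [hdrop]
    have s0 : PySem.Chars.startswith cs ['f','i','g','_'] = false := hf ['f','i','g'] (by decide)
    have s1 : PySem.Chars.startswith cs ['f','i','g','u','r','e','_'] = false := hf ['f','i','g','u','r','e'] (by decide)
    have s2 : PySem.Chars.startswith cs ['t','b','l','_'] = false := hf ['t','b','l'] (by decide)
    have s3 : PySem.Chars.startswith cs ['t','a','b','l','e','_'] = false := hf ['t','a','b','l','e'] (by decide)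
    have s4 : PySem.Chars.startswith cs ['e','q','_'] = false := hf ['e','q'] (by decide)
    have s5 : PySem.Chars.startswith cs ['e','q','u','a','t','i','o','n','_'] = false := hf ['e','q','u','a','t','i','o','n'] (by decide)
    simp [pbLoop, pbPrefixes, s0, s1, s2, s3, s4, s5, hdrop]
  · have hc := pb_hdw cs c r hdrop
    subst hc
    have hne : cs.dropWhile (· != '_') ≠ [] := by rw [hdrop]; simp
    have hst : ∀ w : List Char, '_' ∉ w → (PySem.Chars.startswith cs (w ++ ['_']) = true ↔ cs.takeWhile (· != '_') = w) := by
      intro w hw; rw [pb_sw w cs hw]; simp [hne]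
    by_cases e0 : cs.takeWhile (· != '_') = ['f','i','g']
    · -- head is "fig"-family word nr. 0: A's test 0 fires, the later ones cannot
      have st : PySem.Chars.startswith cs ['f','i','g','_'] = true := (hst ['f','i','g'] (by decide)).2 e0
      have sf1 : PySem.Chars.startswith cs ['f','i','g','u','r','e','_'] = false := by
        apply Bool.eq_false_iff.mpr; intro h
        have h2 : cs.takeWhile (· != '_') = ['f','i','g','u','r','e'] := (hst ['f','i','g','u','r','e'] (by decide)).1 h
        rw [e0] at h2; exact absurd h2 (by decide)
      have sf2 : PySem.Chars.startswith cs ['t','b','l','_'] = false := by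
        apply Bool.eq_false_iff.mpr; intro h
        have h2 : cs.takeWhile (· != '_') = ['t','b','l'] := (hst ['t','b','l'] (by decide)).1 h
        rw [e0] at h2; exact absurd h2 (by decide)
      have sf3 : PySem.Chars.startswith cs ['t','a','b','l','e','_'] = false := by
        apply Bool.eq_false_iff.mpr; intro h
        have h2 : cs.takeWhile (· != '_') = ['t','a','b','l','e'] := (hst ['t','a','b','l','e'] (by decide)).1 h
        rw [e0] at h2; exact absurd h2 (by decide)
      have sf4 : PySem.Chars.startswith cs ['e','q','_'] = false := by
        apply Bool.eq_false_iff.mpr; intro h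
        have h2 : cs.takeWhile (· != '_') = ['e','q'] := (hst ['e','q'] (by decide)).1 h
        rw [e0] at h2; exact absurd h2 (by decide)
      have sf5 : PySem.Chars.startswith cs ['e','q','u','a','t','i','o','n','_'] = false := by
        apply Bool.eq_false_iff.mpr; intro h
        have h2 : cs.takeWhile (· != '_') = ['e','q','u','a','t','i','o','n'] := (hst ['e','q','u','a','t','i','o','n'] (by decide)).1 h
        rw [e0] at h2; exact absurd h2 (by decide)
      have hdr : cs.drop (((4 : Int)).toNat) = r := pb_rest ['f','i','g'] cs r e0 hdrop
      have hsl : PySem.List.slice cs (some (4 : Int)) none = r := by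
        rw [PySem.List.slice_from] <;> first | exact hdr | norm_num
      have hg : pbTypes.get? (cs.takeWhile (· != '_')) = some "fig" := by rw [e0]; decide
      rcases hof : PySem.Int.ofChars? r with _ | m
      · simp [pbLoop, pbPrefixes, st, sf1, sf2, sf3, sf4, sf5, hsl, hof, hdrop, hg]
      · simp [pbLoop, pbPrefixes, st, hsl, hof, hdrop, hg]
    by_cases e1 : cs.takeWhile (· != '_') = ['f','i','g','u','r','e']
    · -- head is "fig"-family word nr. 1: A's test 1 fires, the later ones cannot
      have st : PySem.Chars.startswith cs ['f','i','g','u','r','e','_'] = true := (hst ['f','i','g','u','r','e'] (by decide)).2 e1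
      have sf0 : PySem.Chars.startswith cs ['f','i','g','_'] = false := by
        apply Bool.eq_false_iff.mpr; intro h
        have h2 : cs.takeWhile (· != '_') = ['f','i','g'] := (hst ['f','i','g'] (by decide)).1 h
        rw [e1] at h2; exact absurd h2 (by decide)
      have sf2 : PySem.Chars.startswith cs ['t','b','l','_'] = false := by
        apply Bool.eq_false_iff.mpr; intro h
        have h2 : cs.takeWhile (· != '_') = ['t','b','l'] := (hst ['t','b','l'] (by decide)).1 h
        rw [e1] at h2; exact absurd h2 (by decide)
      have sf3 : PySem.Chars.startswith cs ['t','a','b','l','e','_'] = false := by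
        apply Bool.eq_false_iff.mpr; intro h
        have h2 : cs.takeWhile (· != '_') = ['t','a','b','l','e'] := (hst ['t','a','b','l','e'] (by decide)).1 h
        rw [e1] at h2; exact absurd h2 (by decide)
      have sf4 : PySem.Chars.startswith cs ['e','q','_'] = false := by
        apply Bool.eq_false_iff.mpr; intro h
        have h2 : cs.takeWhile (· != '_') = ['e','q'] := (hst ['e','q'] (by decide)).1 h
        rw [e1] at h2; exact absurd h2 (by decide)
      have sf5 : PySem.Chars.startswith cs ['e','q','u','a','t','i','o','n','_'] = false := by
        apply Bool.eq_false_iff.mpr; intro h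
        have h2 : cs.takeWhile (· != '_') = ['e','q','u','a','t','i','o','n'] := (hst ['e','q','u','a','t','i','o','n'] (by decide)).1 h
        rw [e1] at h2; exact absurd h2 (by decide)
      have hdr : cs.drop (((7 : Int)).toNat) = r := pb_rest ['f','i','g','u','r','e'] cs r e1 hdrop
      have hsl : PySem.List.slice cs (some (7 : Int)) none = r := by
        rw [PySem.List.slice_from] <;> first | exact hdr | norm_num
      have hg : pbTypes.get? (cs.takeWhile (· != '_')) = some "fig" := by rw [e1]; decide
      rcases hof : PySem.Int.ofChars? r with _ | m
      · simp [pbLoop, pbPrefixes, st, sf0, sf2, sf3, sf4, sf5, hsl, hof, hdrop, hg]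
      · simp [pbLoop, pbPrefixes, st, sf0, hsl, hof, hdrop, hg]
    by_cases e2 : cs.takeWhile (· != '_') = ['t','b','l']
    · -- head is "tbl"-family word nr. 2: A's test 2 fires, the later ones cannot
      have st : PySem.Chars.startswith cs ['t','b','l','_'] = true := (hst ['t','b','l'] (by decide)).2 e2
      have sf0 : PySem.Chars.startswith cs ['f','i','g','_'] = false := by
        apply Bool.eq_false_iff.mpr; intro h
        have h2 : cs.takeWhile (· != '_') = ['f','i','g'] := (hst ['f','i','g'] (by decide)).1 h
        rw [e2] at h2; exact absurd h2 (by decide)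
      have sf1 : PySem.Chars.startswith cs ['f','i','g','u','r','e','_'] = false := by
        apply Bool.eq_false_iff.mpr; intro h
        have h2 : cs.takeWhile (· != '_') = ['f','i','g','u','r','e'] := (hst ['f','i','g','u','r','e'] (by decide)).1 h
        rw [e2] at h2; exact absurd h2 (by decide)
      have sf3 : PySem.Chars.startswith cs ['t','a','b','l','e','_'] = false := by
        apply Bool.eq_false_iff.mpr; intro h
        have h2 : cs.takeWhile (· != '_') = ['t','a','b','l','e'] := (hst ['t','a','b','l','e'] (by decide)).1 h
        rw [e2] at h2; exact absurd h2 (by decide)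
      have sf4 : PySem.Chars.startswith cs ['e','q','_'] = false := by
        apply Bool.eq_false_iff.mpr; intro h
        have h2 : cs.takeWhile (· != '_') = ['e','q'] := (hst ['e','q'] (by decide)).1 h
        rw [e2] at h2; exact absurd h2 (by decide)
      have sf5 : PySem.Chars.startswith cs ['e','q','u','a','t','i','o','n','_'] = false := by
        apply Bool.eq_false_iff.mpr; intro h
        have h2 : cs.takeWhile (· != '_') = ['e','q','u','a','t','i','o','n'] := (hst ['e','q','u','a','t','i','o','n'] (by decide)).1 h
        rw [e2] at h2; exact absurd h2 (by decide)
      have hdr : cs.drop (((4 : Int)).toNat) = r := pb_rest ['t','b','l'] cs r e2 hdrop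
      have hsl : PySem.List.slice cs (some (4 : Int)) none = r := by
        rw [PySem.List.slice_from] <;> first | exact hdr | norm_num
      have hg : pbTypes.get? (cs.takeWhile (· != '_')) = some "tbl" := by rw [e2]; decide
      rcases hof : PySem.Int.ofChars? r with _ | m
      · simp [pbLoop, pbPrefixes, st, sf0, sf1, sf3, sf4, sf5, hsl, hof, hdrop, hg]
      · simp [pbLoop, pbPrefixes, st, sf0, sf1, hsl, hof, hdrop, hg]
    by_cases e3 : cs.takeWhile (· != '_') = ['t','a','b','l','e']
    · -- head is "tbl"-family word nr. 3: A's test 3 fires, the later ones cannot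
      have st : PySem.Chars.startswith cs ['t','a','b','l','e','_'] = true := (hst ['t','a','b','l','e'] (by decide)).2 e3
      have sf0 : PySem.Chars.startswith cs ['f','i','g','_'] = false := by
        apply Bool.eq_false_iff.mpr; intro h
        have h2 : cs.takeWhile (· != '_') = ['f','i','g'] := (hst ['f','i','g'] (by decide)).1 h
        rw [e3] at h2; exact absurd h2 (by decide)
      have sf1 : PySem.Chars.startswith cs ['f','i','g','u','r','e','_'] = false := by
        apply Bool.eq_false_iff.mpr; intro h
        have h2 : cs.takeWhile (· != '_') = ['f','i','g','u','r','e'] := (hst ['f','i','g','u','r','e'] (by decide)).1 h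
        rw [e3] at h2; exact absurd h2 (by decide)
      have sf2 : PySem.Chars.startswith cs ['t','b','l','_'] = false := by
        apply Bool.eq_false_iff.mpr; intro h
        have h2 : cs.takeWhile (· != '_') = ['t','b','l'] := (hst ['t','b','l'] (by decide)).1 h
        rw [e3] at h2; exact absurd h2 (by decide)
      have sf4 : PySem.Chars.startswith cs ['e','q','_'] = false := by
        apply Bool.eq_false_iff.mpr; intro h
        have h2 : cs.takeWhile (· != '_') = ['e','q'] := (hst ['e','q'] (by decide)).1 h
        rw [e3] at h2; exact absurd h2 (by decide)
      have sf5 : PySem.Chars.startswith cs ['e','q','u','a','t','i','o','n','_'] = false := by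
        apply Bool.eq_false_iff.mpr; intro h
        have h2 : cs.takeWhile (· != '_') = ['e','q','u','a','t','i','o','n'] := (hst ['e','q','u','a','t','i','o','n'] (by decide)).1 h
        rw [e3] at h2; exact absurd h2 (by decide)
      have hdr : cs.drop (((6 : Int)).toNat) = r := pb_rest ['t','a','b','l','e'] cs r e3 hdrop
      have hsl : PySem.List.slice cs (some (6 : Int)) none = r := by
        rw [PySem.List.slice_from] <;> first | exact hdr | norm_num
      have hg : pbTypes.get? (cs.takeWhile (· != '_')) = some "tbl" := by rw [e3]; decide
      rcases hof : PySem.Int.ofChars? r with _ | m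
      · simp [pbLoop, pbPrefixes, st, sf0, sf1, sf2, sf4, sf5, hsl, hof, hdrop, hg]
      · simp [pbLoop, pbPrefixes, st, sf0, sf1, sf2, hsl, hof, hdrop, hg]
    by_cases e4 : cs.takeWhile (· != '_') = ['e','q']
    · -- head is "eq"-family word nr. 4: A's test 4 fires, the later ones cannot
      have st : PySem.Chars.startswith cs ['e','q','_'] = true := (hst ['e','q'] (by decide)).2 e4
      have sf0 : PySem.Chars.startswith cs ['f','i','g','_'] = false := by
        apply Bool.eq_false_iff.mpr; intro h
        have h2 : cs.takeWhile (· != '_') = ['f','i','g'] := (hst ['f','i','g'] (by decide)).1 h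
        rw [e4] at h2; exact absurd h2 (by decide)
      have sf1 : PySem.Chars.startswith cs ['f','i','g','u','r','e','_'] = false := by
        apply Bool.eq_false_iff.mpr; intro h
        have h2 : cs.takeWhile (· != '_') = ['f','i','g','u','r','e'] := (hst ['f','i','g','u','r','e'] (by decide)).1 h
        rw [e4] at h2; exact absurd h2 (by decide)
      have sf2 : PySem.Chars.startswith cs ['t','b','l','_'] = false := by
        apply Bool.eq_false_iff.mpr; intro h
        have h2 : cs.takeWhile (· != '_') = ['t','b','l'] := (hst ['t','b','l'] (by decide)).1 h
        rw [e4] at h2; exact absurd h2 (by decide)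
      have sf3 : PySem.Chars.startswith cs ['t','a','b','l','e','_'] = false := by
        apply Bool.eq_false_iff.mpr; intro h
        have h2 : cs.takeWhile (· != '_') = ['t','a','b','l','e'] := (hst ['t','a','b','l','e'] (by decide)).1 h
        rw [e4] at h2; exact absurd h2 (by decide)
      have sf5 : PySem.Chars.startswith cs ['e','q','u','a','t','i','o','n','_'] = false := by
        apply Bool.eq_false_iff.mpr; intro h
        have h2 : cs.takeWhile (· != '_') = ['e','q','u','a','t','i','o','n'] := (hst ['e','q','u','a','t','i','o','n'] (by decide)).1 h
        rw [e4] at h2; exact absurd h2 (by decide)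
      have hdr : cs.drop (((3 : Int)).toNat) = r := pb_rest ['e','q'] cs r e4 hdrop
      have hsl : PySem.List.slice cs (some (3 : Int)) none = r := by
        rw [PySem.List.slice_from] <;> first | exact hdr | norm_num
      have hg : pbTypes.get? (cs.takeWhile (· != '_')) = some "eq" := by rw [e4]; decide
      rcases hof : PySem.Int.ofChars? r with _ | m
      · simp [pbLoop, pbPrefixes, st, sf0, sf1, sf2, sf3, sf5, hsl, hof, hdrop, hg]
      · simp [pbLoop, pbPrefixes, st, sf0, sf1, sf2, sf3, hsl, hof, hdrop, hg]
    by_cases e5 : cs.takeWhile (· != '_') = ['e','q','u','a','t','i','o','n']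
    · -- head is "eq"-family word nr. 5: A's test 5 fires, the later ones cannot
      have st : PySem.Chars.startswith cs ['e','q','u','a','t','i','o','n','_'] = true := (hst ['e','q','u','a','t','i','o','n'] (by decide)).2 e5
      have sf0 : PySem.Chars.startswith cs ['f','i','g','_'] = false := by
        apply Bool.eq_false_iff.mpr; intro h
        have h2 : cs.takeWhile (· != '_') = ['f','i','g'] := (hst ['f','i','g'] (by decide)).1 h
        rw [e5] at h2; exact absurd h2 (by decide)
      have sf1 : PySem.Chars.startswith cs ['f','i','g','u','r','e','_'] = false := by
        apply Bool.eq_false_iff.mpr; intro h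
        have h2 : cs.takeWhile (· != '_') = ['f','i','g','u','r','e'] := (hst ['f','i','g','u','r','e'] (by decide)).1 h
        rw [e5] at h2; exact absurd h2 (by decide)
      have sf2 : PySem.Chars.startswith cs ['t','b','l','_'] = false := by
        apply Bool.eq_false_iff.mpr; intro h
        have h2 : cs.takeWhile (· != '_') = ['t','b','l'] := (hst ['t','b','l'] (by decide)).1 h
        rw [e5] at h2; exact absurd h2 (by decide)
      have sf3 : PySem.Chars.startswith cs ['t','a','b','l','e','_'] = false := by
        apply Bool.eq_false_iff.mpr; intro h
        have h2 : cs.takeWhile (· != '_') = ['t','a','b','l','e'] := (hst ['t','a','b','l','e'] (by decide)).1 h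
        rw [e5] at h2; exact absurd h2 (by decide)
      have sf4 : PySem.Chars.startswith cs ['e','q','_'] = false := by
        apply Bool.eq_false_iff.mpr; intro h
        have h2 : cs.takeWhile (· != '_') = ['e','q'] := (hst ['e','q'] (by decide)).1 h
        rw [e5] at h2; exact absurd h2 (by decide)
      have hdr : cs.drop (((9 : Int)).toNat) = r := pb_rest ['e','q','u','a','t','i','o','n'] cs r e5 hdrop
      have hsl : PySem.List.slice cs (some (9 : Int)) none = r := by
        rw [PySem.List.slice_from] <;> first | exact hdr | norm_num
      have hg : pbTypes.get? (cs.takeWhile (· != '_')) = some "eq" := by rw [e5]; decide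
      rcases hof : PySem.Int.ofChars? r with _ | m
      · simp [pbLoop, pbPrefixes, st, sf0, sf1, sf2, sf3, sf4, hsl, hof, hdrop, hg]
      · simp [pbLoop, pbPrefixes, st, sf0, sf1, sf2, sf3, sf4, hsl, hof, hdrop, hg]
    -- head matches no key: A's six tests all fail, B's lookup returns none
    have sf0 : PySem.Chars.startswith cs ['f','i','g','_'] = false := by
      apply Bool.eq_false_iff.mpr; intro h
      exact e0 ((hst ['f','i','g'] (by decide)).1 h)
    have sf1 : PySem.Chars.startswith cs ['f','i','g','u','r','e','_'] = false := by
      apply Bool.eq_false_iff.mpr; intro h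
      exact e1 ((hst ['f','i','g','u','r','e'] (by decide)).1 h)
    have sf2 : PySem.Chars.startswith cs ['t','b','l','_'] = false := by
      apply Bool.eq_false_iff.mpr; intro h
      exact e2 ((hst ['t','b','l'] (by decide)).1 h)
    have sf3 : PySem.Chars.startswith cs ['t','a','b','l','e','_'] = false := by
      apply Bool.eq_false_iff.mpr; intro h
      exact e3 ((hst ['t','a','b','l','e'] (by decide)).1 h)
    have sf4 : PySem.Chars.startswith cs ['e','q','_'] = false := by
      apply Bool.eq_false_iff.mpr; intro h
      exact e4 ((hst ['e','q'] (by decide)).1 h)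
    have sf5 : PySem.Chars.startswith cs ['e','q','u','a','t','i','o','n','_'] = false := by
      apply Bool.eq_false_iff.mpr; intro h
      exact e5 ((hst ['e','q','u','a','t','i','o','n'] (by decide)).1 h)
    have hget : pbTypes.get? (cs.takeWhile (· != '_')) = none := by
      rw [PySem.Dict.get?_eq_none_iff_not_mem_keys]
      have hk : pbTypes.keys = [['f','i','g'], ['f','i','g','u','r','e'], ['t','b','l'],
          ['t','a','b','l','e'], ['e','q'], ['e','q','u','a','t','i','o','n']] := by decide
      rw [hk]; simp [e0, e1, e2, e3, e4, e5]
    simp [pbLoop, pbPrefixes, sf0, sf1, sf2, sf3, sf4, sf5, hdrop, hget]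

-- ===== VERDICT (by name: the statement is the Claim_ definition above) =====
theorem parse_bookmark_name_py_spec : Claim_equal_parse_bookmark_name_py := by
  intro name _
  unfold Spec_parse_bookmark_name_py
  exact pb_main name
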